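-- pv_equiv track=rewrite | github.com/immeritos/leetcode-acm | test/double-pointer-interval.py | max_peak_diff
-- ===== SOURCE A (Python) =====
-- def max_peak_diff(array):
--     n = len(array)
--     if n==0:
--         return 0
--
--     left = [0]*n
--     for i in range(n):
--         if i>0 and array[i-1] <= array[i]:
--             left[i] = left[i-1]
--         else:
--             left[i] = i
--
--     right = [0]*n
--     right[-1] = n-1
--     for i in range(n-2, -1, -1):
--         if array[i] >= array[i+1]:
--             right[i] = right[i+1]
--         else:
--             right[i] = i
--
--     ans = 0
--     for i in range(n):
--         L, R = left[i], right[i]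
--         if L < i and R > i:
--             ans = max(ans, array[i] - min(array[L], array[R]))
--
--     return ans
-- ===== SOURCE B (Python) =====
-- def max_peak_diff(array):
--     n = len(array)
--     ans = 0
--     for i in range(1, n - 1):
--         if array[i - 1] <= array[i] and array[i] >= array[i + 1]:
--             L = i - 1
--             while L > 0 and array[L - 1] <= array[L]:
--                 L -= 1
--             R = i + 1
--             while R < n - 1 and array[R] >= array[R + 1]:
--                 R += 1
--             ans = max(ans, array[i] - min(array[L], array[R]))
--     return ans
-- ===== Notes on version B (the rewrite author's own statement) =====
-- stated objective: alternative
-- what changed: Replaces the three-pass DP (precomputed left/right run-boundary arrays then a scan) with a single scan that detects each peak locally and expands outward on demand to find its run boundaries, using O(1) extra space instead of two O(n) arrays.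
import Mathlib
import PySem

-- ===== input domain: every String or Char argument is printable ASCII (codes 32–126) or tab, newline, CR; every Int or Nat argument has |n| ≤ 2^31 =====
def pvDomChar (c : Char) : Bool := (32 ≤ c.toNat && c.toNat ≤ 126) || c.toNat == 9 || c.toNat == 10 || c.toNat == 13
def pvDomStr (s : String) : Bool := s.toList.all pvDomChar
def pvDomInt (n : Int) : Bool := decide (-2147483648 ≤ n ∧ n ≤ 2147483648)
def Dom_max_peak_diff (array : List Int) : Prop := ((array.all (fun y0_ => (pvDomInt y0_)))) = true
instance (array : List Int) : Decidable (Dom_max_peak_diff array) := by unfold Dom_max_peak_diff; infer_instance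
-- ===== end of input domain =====

-- B replaces A's three-pass DP (left/right run-boundary arrays) by a single scan that
-- detects each peak locally and expands outward on demand (alternative decomposition, O(1) extra space).
-- Port note: every Python list index in both programs is a natural number provably in range,
-- so array[i] is ported as List.getD i 0 (exact there); A's left/right arrays hold Python ints,
-- ported as List Int, and the indexed reads array[L], array[R] use PySem.List.pyGetD.

-- ===== PORT A =====
-- left = [0]*n; for i in range(n): left[i] = left[i-1] if (i>0 and a[i-1]<=a[i]) else i
-- (built as the growing prefix [left[0], …, left[i-1]]; only already-written cells are read)
def pvBuildLeft (a : List Int) : Nat → List Int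
  | 0 => []
  | i + 1 =>
    let l := pvBuildLeft a i
    l ++ [if 0 < i ∧ a.getD (i - 1) 0 ≤ a.getD i 0 then l.getD (i - 1) 0 else (i : Int)]

-- right[-1] = n-1; for i in range(n-2, -1, -1): right[i] = right[i+1] if a[i]>=a[i+1] else i
-- (built back to front as the suffix [right[n-k], …, right[n-1]] of length k)
def pvBuildRight (a : List Int) (n : Nat) : Nat → List Int
  | 0 => []
  | 1 => [((n - 1 : Nat) : Int)]
  | k + 2 =>
    let r := pvBuildRight a n (k + 1)
    (if a.getD (n - (k + 1)) 0 ≤ a.getD (n - (k + 2)) 0 then r.getD 0 0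
     else ((n - (k + 2) : Nat) : Int)) :: r

def max_peak_diff (array : List Int) : Int :=
  let n := array.length
  if n = 0 then 0
  else
    let left := pvBuildLeft array n
    let right := pvBuildRight array n n
    (List.range n).foldl (fun ans i =>
      let L := left.getD i 0
      let R := right.getD i 0
      if L < (i : Int) ∧ (i : Int) < R then
        max ans (array.getD i 0 - min (PySem.List.pyGetD array L 0) (PySem.List.pyGetD array R 0))
      else ans) 0

-- ===== PORT B =====
-- L = i-1; while L > 0 and a[L-1] <= a[L]: L -= 1   (structural recursion on L)
def pvExpandL (a : List Int) : Nat → Nat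
  | 0 => 0
  | j + 1 => if a.getD j 0 ≤ a.getD (j + 1) 0 then pvExpandL a j else j + 1

-- R = i+1; while R < n-1 and a[R] >= a[R+1]: R += 1
def pvExpandR (a : List Int) (n r : Nat) : Nat :=
  if h : r < n - 1 ∧ a.getD (r + 1) 0 ≤ a.getD r 0 then pvExpandR a n (r + 1) else r
  termination_by n - 1 - r
  decreasing_by omega

def max_peak_diff_alt (array : List Int) : Int :=
  let n := array.length
  (List.range' 1 (n - 2)).foldl (fun ans i =>
    if array.getD (i - 1) 0 ≤ array.getD i 0 ∧ array.getD (i + 1) 0 ≤ array.getD i 0 then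
      let L := pvExpandL array (i - 1)
      let R := pvExpandR array n (i + 1)
      max ans (array.getD i 0 - min (array.getD L 0) (array.getD R 0))
    else ans) 0

-- ===== PRECONDITION & SPEC =====
def Spec_max_peak_diff (array : List Int) (out : Int) : Prop := out = max_peak_diff_alt array
instance (array : List Int) (out : Int) : Decidable (Spec_max_peak_diff array out) := by unfold Spec_max_peak_diff; infer_instance

-- ===== CLAIM (what is proved, stated in full; the proofs are below) =====
def Claim_equal_max_peak_diff : Prop := ∀ (array : List Int), Dom_max_peak_diff array → Spec_max_peak_diff array (max_peak_diff array)

-- ===== LEMMAS AND PROOFS =====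

theorem pvBuildLeft_length (a : List Int) (n : Nat) : (pvBuildLeft a n).length = n := by
  induction n with
  | zero => rfl
  | succ i ih => simp [pvBuildLeft, ih]

theorem pvExpandL_le (a : List Int) (j : Nat) : pvExpandL a j ≤ j := by
  induction j with
  | zero => simp [pvExpandL]
  | succ j ih => simp only [pvExpandL]; split <;> omega

theorem pvExpandR_ge (a : List Int) (n r : Nat) : r ≤ pvExpandR a n r := by
  induction r using pvExpandR.induct a n with
  | case1 r h ih => rw [pvExpandR, dif_pos h]; omega
  | case2 r h => rw [pvExpandR, dif_neg h]

theorem pvBuildLeft_getD (a : List Int) : ∀ (n i : Nat), i < n →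
    (pvBuildLeft a n).getD i 0 = ((pvExpandL a i : Nat) : Int)
  | 0, i, hi => by omega
  | m + 1, i, hi => by
    simp only [pvBuildLeft]
    rcases Nat.lt_or_ge i m with h | h
    · rw [List.getD_append _ _ _ _ (by rw [pvBuildLeft_length]; exact h)]
      exact pvBuildLeft_getD a m i h
    · have him : i = m := by omega
      subst him
      rw [List.getD_append_right _ _ _ _ (pvBuildLeft_length a i).le]
      simp only [Nat.sub_self, List.getD_cons_zero, pvBuildLeft_length]
      cases i with
      | zero => simp [pvExpandL]
      | succ j =>
        simp only [pvExpandL, Nat.add_sub_cancel]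
        by_cases hle : a.getD j 0 ≤ a.getD (j + 1) 0
        · rw [if_pos ⟨Nat.succ_pos j, hle⟩, if_pos hle]
          exact pvBuildLeft_getD a (j + 1) j (by omega)
        · rw [if_neg (fun hc => hle hc.2), if_neg hle]

theorem pvBuildRight_getD (a : List Int) (n : Nat) :
    ∀ (k : Nat), 1 ≤ k → k ≤ n → ∀ (j : Nat), j < k →
    (pvBuildRight a n k).getD j 0 = ((pvExpandR a n (n - k + j) : Nat) : Int)
  | 0, h, _, _, _ => by omega
  | 1, _, hkn, j, hj => by
    interval_cases j
    simp only [pvBuildRight, List.getD_cons_zero, Nat.add_zero]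
    rw [pvExpandR, dif_neg (by omega)]
  | k + 2, _, hkn, j, hj => by
    simp only [pvBuildRight]
    cases j with
    | zero =>
      simp only [List.getD_cons_zero, Nat.add_zero]
      rw [pvExpandR]
      have h1 : n - (k + 2) + 1 = n - (k + 1) := by omega
      have h2 : n - (k + 2) < n - 1 := by omega
      split
      · next hc =>
        rw [dif_pos (by rw [h1]; exact ⟨h2, hc⟩), h1,
          pvBuildRight_getD a n (k + 1) (by omega) (by omega) 0 (by omega)]
        simp
      · next hc =>
        rw [dif_neg (by rw [h1]; exact fun hcc => hc hcc.2)]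
    | succ j' =>
      simp only [List.getD_cons_succ]
      rw [pvBuildRight_getD a n (k + 1) (by omega) (by omega) j' (by omega)]
      congr 2
      omega

-- one unfolding step of each while loop, and where it stops
theorem pvExpandR_succ (a : List Int) (n r : Nat) (h : r < n - 1)
    (hle : a.getD (r + 1) 0 ≤ a.getD r 0) : pvExpandR a n r = pvExpandR a n (r + 1) := by
  rw [pvExpandR, dif_pos ⟨h, hle⟩]

theorem pvExpandR_stop (a : List Int) (n r : Nat)
    (h : ¬(r < n - 1 ∧ a.getD (r + 1) 0 ≤ a.getD r 0)) : pvExpandR a n r = r := by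
  rw [pvExpandR, dif_neg h]

-- the two fold steps agree at every interior index 1 ≤ i ≤ n-2 …
theorem pv_step_interior (a : List Int) (n : Nat) (hn : n = a.length) (i : Nat)
    (h1 : 1 ≤ i) (h2 : i ≤ n - 2) (hn2 : 2 ≤ n) (ans : Int) :
    (if (pvBuildLeft a n).getD i 0 < (i : Int) ∧ (i : Int) < (pvBuildRight a n n).getD i 0 then
       max ans (a.getD i 0 - min (PySem.List.pyGetD a ((pvBuildLeft a n).getD i 0) 0)
                                 (PySem.List.pyGetD a ((pvBuildRight a n n).getD i 0) 0))
     else ans)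
    = (if a.getD (i - 1) 0 ≤ a.getD i 0 ∧ a.getD (i + 1) 0 ≤ a.getD i 0 then
         max ans (a.getD i 0 - min (a.getD (pvExpandL a (i - 1)) 0) (a.getD (pvExpandR a n (i + 1)) 0))
       else ans) := by
  obtain ⟨j, rfl⟩ : ∃ j, i = j + 1 := ⟨i - 1, by omega⟩
  rw [pvBuildLeft_getD a n (j + 1) (by omega),
    pvBuildRight_getD a n n (by omega) (le_refl n) (j + 1) (by omega)]
  simp only [Nat.sub_self, Nat.zero_add, Nat.add_sub_cancel,
    PySem.List.pyGetD_natCast, Nat.cast_lt]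
  by_cases c1 : a.getD j 0 ≤ a.getD (j + 1) 0
  · by_cases c2 : a.getD (j + 1 + 1) 0 ≤ a.getD (j + 1) 0
    · have hL : pvExpandL a (j + 1) = pvExpandL a j := by simp only [pvExpandL]; rw [if_pos c1]
      have hR : pvExpandR a n (j + 1) = pvExpandR a n (j + 1 + 1) :=
        pvExpandR_succ a n (j + 1) (by omega) c2
      have hlt1 : pvExpandL a (j + 1) < j + 1 := by
        rw [hL]; exact Nat.lt_succ_of_le (pvExpandL_le a j)
      have hlt2 : j + 1 < pvExpandR a n (j + 1) := by
        rw [hR]; have := pvExpandR_ge a n (j + 1 + 1); omega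
      rw [if_pos ⟨hlt1, hlt2⟩, if_pos ⟨c1, c2⟩, hL, hR]
    · have hR : pvExpandR a n (j + 1) = j + 1 :=
        pvExpandR_stop a n (j + 1) (fun hc => c2 hc.2)
      rw [if_neg (fun hc => by rw [hR] at hc; omega),
        if_neg (fun hc => c2 hc.2)]
  · have hL : pvExpandL a (j + 1) = j + 1 := by simp only [pvExpandL]; rw [if_neg c1]
    rw [if_neg (fun hc => by rw [hL] at hc; omega),
      if_neg (fun hc => c1 hc.1)]

-- … and A's step is the identity at i = 0 and i = n-1
theorem pv_step_zero (a : List Int) (n : Nat) (hn1 : 1 ≤ n) (ans : Int) :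
    (if (pvBuildLeft a n).getD 0 0 < ((0 : Nat) : Int) ∧
        ((0 : Nat) : Int) < (pvBuildRight a n n).getD 0 0 then
       max ans (a.getD 0 0 - min (PySem.List.pyGetD a ((pvBuildLeft a n).getD 0 0) 0)
                                 (PySem.List.pyGetD a ((pvBuildRight a n n).getD 0 0) 0))
     else ans) = ans := by
  rw [pvBuildLeft_getD a n 0 (by omega)]
  rw [if_neg (by simp [pvExpandL])]

theorem pv_step_last (a : List Int) (n : Nat) (hn1 : 1 ≤ n) (ans : Int) :
    (if (pvBuildLeft a n).getD (n - 1) 0 < ((n - 1 : Nat) : Int) ∧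
        ((n - 1 : Nat) : Int) < (pvBuildRight a n n).getD (n - 1) 0 then
       max ans (a.getD (n - 1) 0 - min (PySem.List.pyGetD a ((pvBuildLeft a n).getD (n - 1) 0) 0)
                                       (PySem.List.pyGetD a ((pvBuildRight a n n).getD (n - 1) 0) 0))
     else ans) = ans := by
  have hch := pvBuildRight_getD a n n (by omega) (le_refl n) (n - 1) (by omega)
  rw [show n - n + (n - 1) = n - 1 by omega] at hch
  have hstop : pvExpandR a n (n - 1) = n - 1 := pvExpandR_stop a n (n - 1) (by omega)
  rw [hch, hstop, if_neg (by simp)]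

-- the index-list decomposition behind the two folds
theorem pv_range_split (n : Nat) (h : 2 ≤ n) :
    List.range n = [0] ++ List.range' 1 (n - 2) ++ [n - 1] := by
  rw [List.range_eq_range', show n = 1 + (n - 2) + 1 by omega,
    ← List.range'_append, ← List.range'_append]
  simp

-- ===== VERDICT (by name: the statement is the Claim_ definition above) =====
theorem max_peak_diff_spec : Claim_equal_max_peak_diff := by
  intro array _
  unfold Spec_max_peak_diff max_peak_diff max_peak_diff_alt
  dsimp only
  by_cases h0 : array.length = 0
  · rw [if_pos h0, h0]; rfl
  rw [if_neg h0]
  by_cases h1 : array.length = 1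
  · rw [h1]
    simp only [List.range_one, List.foldl_cons, List.foldl_nil]
    exact pv_step_zero array 1 (by omega) 0
  · have hn2 : 2 ≤ array.length := by omega
    rw [pv_range_split _ hn2, List.foldl_append, List.foldl_append]
    simp only [List.foldl_cons, List.foldl_nil]
    rw [pv_step_zero array array.length (by omega) 0]
    rw [pv_step_last array array.length (by omega)]
    exact PySem.List.foldl_congr_mem _ _ _ _ (fun acc x hx => by
      have hb := List.mem_range'_1.mp hx
      exact pv_step_interior array array.length rfl x (by omega) (by omega) hn2 acc)
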